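-- pv_equiv track=rewrite | github.com/LaurentiuLala/-Curs-Python | T6/Parola.py | verifica_parola
-- ===== SOURCE A (Python) =====
-- def verifica_parola(parola):
--     criterii_neindeplinite = []
--
--     caractere_speciale = "!@#$%^&*()-_+=<>?"
--
--     # Lungime minima
--     if len(parola) < 8:
--         criterii_neindeplinite.append("lungimea minima de 8 caractere")
--
--     # Litera majuscula
--     if not any(c.isupper() for c in parola):
--         criterii_neindeplinite.append("o litera majuscula")
--
--     # Litera minuscula
--     if not any(c.islower() for c in parola):
--         criterii_neindeplinite.append("o litera minuscula")
--
--     # Cifra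
--     if not any(c.isdigit() for c in parola):
--         criterii_neindeplinite.append("o cifra")
--
--     # Caracter special
--     if not any(c in caractere_speciale for c in parola):
--         criterii_neindeplinite.append("un caracter special")
--
--     # Fara spatii
--     if " " in parola:
--         criterii_neindeplinite.append("eliminarea spatiilor")
--
--     return criterii_neindeplinite
-- ===== SOURCE B (Python) =====
-- def verifica_parola(parola):
--     caractere_speciale = "!@#$%^&*()-_+=<>?"
--     has_upper = has_lower = has_digit = has_special = has_space = False
--     for c in parola:
--         if c.isupper():
--             has_upper = True
--         if c.islower():
--             has_lower = True
--         if c.isdigit():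
--             has_digit = True
--         if c in caractere_speciale:
--             has_special = True
--         if c == ' ':
--             has_space = True
--     criterii_neindeplinite = []
--     if len(parola) < 8:
--         criterii_neindeplinite.append("lungimea minima de 8 caractere")
--     if not has_upper:
--         criterii_neindeplinite.append("o litera majuscula")
--     if not has_lower:
--         criterii_neindeplinite.append("o litera minuscula")
--     if not has_digit:
--         criterii_neindeplinite.append("o cifra")
--     if not has_special:
--         criterii_neindeplinite.append("un caracter special")
--     if has_space:
--         criterii_neindeplinite.append("eliminarea spatiilor")
--     return criterii_neindeplinite
-- ===== Notes on version B (the rewrite author's own statement) =====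
-- stated objective: faster
-- what changed: Replaces A's five separate any()-scans over the password with a single pass maintaining five boolean flags, then builds the message list from the flags.
import Mathlib
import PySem

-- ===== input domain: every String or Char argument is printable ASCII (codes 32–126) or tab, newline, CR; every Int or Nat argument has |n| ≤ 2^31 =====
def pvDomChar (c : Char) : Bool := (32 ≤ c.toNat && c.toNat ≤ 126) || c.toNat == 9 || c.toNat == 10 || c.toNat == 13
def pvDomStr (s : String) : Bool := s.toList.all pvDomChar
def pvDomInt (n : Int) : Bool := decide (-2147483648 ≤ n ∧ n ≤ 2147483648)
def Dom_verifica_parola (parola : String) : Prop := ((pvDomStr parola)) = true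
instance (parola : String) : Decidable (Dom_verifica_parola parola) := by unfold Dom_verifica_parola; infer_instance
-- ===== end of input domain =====

-- B replaces A's five separate any()-scans with a single pass maintaining five boolean flags (constant-factor faster).

-- ===== PORT A =====
-- A tests each criterion with its own scan of the password and appends the message when it fails.
def verifica_parola (parola : String) : List String :=
  (if parola.toList.length < 8 then ["lungimea minima de 8 caractere"] else []) ++
  (if !(parola.toList.any (fun c => PySem.Chars.isupper c)) then ["o litera majuscula"] else []) ++
  (if !(parola.toList.any (fun c => PySem.Chars.islower c)) then ["o litera minuscula"] else []) ++
  (if !(parola.toList.any (fun c => PySem.Chars.isdigit c)) then ["o cifra"] else []) ++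
  (if !(parola.toList.any (fun c => "!@#$%^&*()-_+=<>?".toList.contains c)) then ["un caracter special"] else []) ++
  (if parola.toList.contains ' ' then ["eliminarea spatiilor"] else [])

-- ===== PORT B =====
-- one loop over the password updating five flags, then the messages are read off the flags
def verifica_parola_alt (parola : String) : List String :=
  let flags := parola.toList.foldl
    (fun (f : Bool × Bool × Bool × Bool × Bool) c =>
      ((if PySem.Chars.isupper c then true else f.1),
       (if PySem.Chars.islower c then true else f.2.1),
       (if PySem.Chars.isdigit c then true else f.2.2.1),
       (if "!@#$%^&*()-_+=<>?".toList.contains c then true else f.2.2.2.1),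
       (if c == ' ' then true else f.2.2.2.2)))
    (false, false, false, false, false)
  (if parola.toList.length < 8 then ["lungimea minima de 8 caractere"] else []) ++
  (if !flags.1 then ["o litera majuscula"] else []) ++
  (if !flags.2.1 then ["o litera minuscula"] else []) ++
  (if !flags.2.2.1 then ["o cifra"] else []) ++
  (if !flags.2.2.2.1 then ["un caracter special"] else []) ++
  (if flags.2.2.2.2 then ["eliminarea spatiilor"] else [])

-- ===== PRECONDITION & SPEC =====
def Spec_verifica_parola (parola : String) (out : List String) : Prop := out = verifica_parola_alt parola
instance (parola : String) (out : List String) : Decidable (Spec_verifica_parola parola out) := by unfold Spec_verifica_parola; infer_instance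

-- ===== CLAIM (what is proved, stated in full; the proofs are below) =====
def Claim_equal_verifica_parola : Prop := ∀ (parola : String), Dom_verifica_parola parola → Spec_verifica_parola parola (verifica_parola parola)

-- ===== LEMMAS AND PROOFS =====

/-- The one-pass fold of B computes the five `any`-scans of A. -/
theorem flags_eq (p1 p2 p3 p4 p5 : Char → Bool) (cs : List Char)
    (f : Bool × Bool × Bool × Bool × Bool) :
    cs.foldl
      (fun (f : Bool × Bool × Bool × Bool × Bool) c =>
        ((if p1 c then true else f.1),
         (if p2 c then true else f.2.1),
         (if p3 c then true else f.2.2.1),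
         (if p4 c then true else f.2.2.2.1),
         (if p5 c then true else f.2.2.2.2))) f
    = (f.1 || cs.any p1, f.2.1 || cs.any p2, f.2.2.1 || cs.any p3,
       f.2.2.2.1 || cs.any p4, f.2.2.2.2 || cs.any p5) := by
  induction cs generalizing f with
  | nil => simp
  | cons c cs ih =>
      simp only [List.foldl_cons, List.any_cons, ih]
      obtain ⟨a, b, c', d, e⟩ := f
      by_cases h1 : p1 c <;> by_cases h2 : p2 c <;> by_cases h3 : p3 c <;>
        by_cases h4 : p4 c <;> by_cases h5 : p5 c <;> simp [h1, h2, h3, h4, h5]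

-- ===== VERDICT (by name: the statement is the Claim_ definition above) =====
theorem any_beq_eq_contains (l : List Char) :
    l.any (fun c => c == ' ') = l.contains ' ' := by
  induction l with
  | nil => rfl
  | cons a t ih => simp only [List.any_cons, List.contains_cons, ih, BEq.comm]

theorem verifica_parola_spec : Claim_equal_verifica_parola := by
  intro parola _
  unfold Spec_verifica_parola verifica_parola verifica_parola_alt
  rw [show (List.foldl
      (fun (f : Bool × Bool × Bool × Bool × Bool) c =>
        ((if PySem.Chars.isupper c then true else f.1),
         (if PySem.Chars.islower c then true else f.2.1),
         (if PySem.Chars.isdigit c then true else f.2.2.1),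
         (if "!@#$%^&*()-_+=<>?".toList.contains c then true else f.2.2.2.1),
         (if c == ' ' then true else f.2.2.2.2)))
      (false, false, false, false, false) parola.toList)
    = (parola.toList.any (fun c => PySem.Chars.isupper c),
       parola.toList.any (fun c => PySem.Chars.islower c),
       parola.toList.any (fun c => PySem.Chars.isdigit c),
       parola.toList.any (fun c => "!@#$%^&*()-_+=<>?".toList.contains c),
       parola.toList.any (fun c => c == ' '))
    from by rw [flags_eq]; simp only [Bool.false_or],
    any_beq_eq_contains]
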